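-- pv_equiv track=rewrite | github.com/betteryourpractice/truecore-updates | TrueCoreIntel/intelligence/intelligence_engine.py | evaluate_icd_match_quality
-- ===== SOURCE A (Python) =====
-- def evaluate_icd_match_quality(icd_codes, expected_prefixes):
--     """
--     Returns match quality: strong / moderate / weak
--     based on how many ICDs align with expected diagnosis families.
--     """
--
--     if not icd_codes:
--         return "none"
--
--     total = len(icd_codes)
--     matches = 0
--
--     for code in icd_codes:
--         normalized_code = str(code).upper().strip()
--         if any(normalized_code.startswith(prefix) for prefix in expected_prefixes):
--             matches += 1
--
--     if matches == total and total > 0: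
--         return "strong"
--
--     if matches >= 1:
--         return "moderate"
--
--     return "weak"
-- ===== SOURCE B (Python) =====
-- def evaluate_icd_match_quality(icd_codes, expected_prefixes):
--     """
--     Returns match quality: strong / moderate / weak.
--
--     Different decomposition and data structure: no running counter.
--     Index the prefixes in a hash set once; compute per-code boolean flags by
--     looking each code's leading slices (one per distinct prefix length) up in
--     the set, then classify with all()/any() over the flag list.
--     """
--
--     if not icd_codes:
--         return "none"
--
--     prefix_set = set(expected_prefixes)
--     lengths = {len(p) for p in expected_prefixes}
--
--     flags = [any(str(code).upper().strip()[:n] in prefix_set for n in lengths)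
--              for code in icd_codes]
--
--     if all(flags):
--         return "strong"
--     if any(flags):
--         return "moderate"
--     return "weak"
-- ===== Notes on version B (the rewrite author's own statement) =====
-- stated objective: faster
-- what changed: Replaces A's counter loop that scans the whole prefix list per code with a prefix hash-set built once, per-code boolean flags obtained by looking up each code's leading slices (one per distinct prefix length), and classification via all()/any() over the flag list instead of comparing a match counter.
import Mathlib
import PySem

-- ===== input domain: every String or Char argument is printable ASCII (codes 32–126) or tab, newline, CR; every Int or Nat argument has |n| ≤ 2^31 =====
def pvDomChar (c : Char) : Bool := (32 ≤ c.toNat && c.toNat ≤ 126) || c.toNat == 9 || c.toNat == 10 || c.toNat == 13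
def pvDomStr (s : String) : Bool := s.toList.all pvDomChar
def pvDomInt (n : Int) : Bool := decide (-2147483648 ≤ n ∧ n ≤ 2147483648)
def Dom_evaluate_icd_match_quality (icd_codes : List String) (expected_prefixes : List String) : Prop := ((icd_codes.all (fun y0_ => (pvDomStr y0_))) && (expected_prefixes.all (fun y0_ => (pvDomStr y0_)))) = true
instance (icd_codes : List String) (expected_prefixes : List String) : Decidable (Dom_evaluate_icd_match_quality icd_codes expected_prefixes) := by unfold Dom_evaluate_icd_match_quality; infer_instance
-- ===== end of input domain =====

-- B indexes the prefixes in a set once, computes per-code boolean flags by slice lookup,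
-- and classifies with all/any over the flags instead of A's counter + prefix-list scan (faster by index lookup).


-- ===== PORT A =====
def evaluate_icd_match_quality (icd_codes : List String) (expected_prefixes : List String) : String :=
  if icd_codes = [] then "none"
  else
    let total : Int := icd_codes.length
    let matches_ : Int := icd_codes.foldl (fun m code =>
      let normalized_code := PySem.Str.strip (PySem.Str.upper code)
      if expected_prefixes.any (fun pfx => PySem.Str.startswith normalized_code pfx)
      then m + 1 else m) 0
    if matches_ = total ∧ total > 0 then "strong"
    else if matches_ ≥ 1 then "moderate"
    else "weak"

-- ===== PORT B =====
def evaluate_icd_match_quality_alt (icd_codes : List String) (expected_prefixes : List String) : String :=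
  if icd_codes = [] then "none"
  else
    let prefix_set : PySem.Set String := PySem.Set.ofList expected_prefixes
    let lengths : PySem.Set Int := PySem.Set.ofList (expected_prefixes.map (fun p => PySem.Str.len p))
    let flags : List Bool := icd_codes.map (fun code =>
      lengths.any (fun n => PySem.Set.contains prefix_set
        (PySem.Str.slice (PySem.Str.strip (PySem.Str.upper code)) none (some n))))
    if flags.all id then "strong"
    else if flags.any id then "moderate"
    else "weak"

-- ===== PRECONDITION & SPEC =====
def Spec_evaluate_icd_match_quality (icd_codes : List String) (expected_prefixes : List String) (out : String) : Prop := out = evaluate_icd_match_quality_alt icd_codes expected_prefixes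
instance (icd_codes : List String) (expected_prefixes : List String) (out : String) : Decidable (Spec_evaluate_icd_match_quality icd_codes expected_prefixes out) := by unfold Spec_evaluate_icd_match_quality; infer_instance

-- ===== CLAIM (what is proved, stated in full; the proofs are below) =====
def Claim_equal_evaluate_icd_match_quality : Prop := ∀ (icd_codes : List String) (expected_prefixes : List String), Dom_evaluate_icd_match_quality icd_codes expected_prefixes → Spec_evaluate_icd_match_quality icd_codes expected_prefixes (evaluate_icd_match_quality icd_codes expected_prefixes)

-- ===== LEMMAS AND PROOFS =====

-- A's per-code test (scan the prefix list) coincides with B's (look the code's slices up in the set).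
theorem pv_match_iff (expected : List String) (nc : String) :
    (expected.any (fun pfx => PySem.Str.startswith nc pfx))
      = ((PySem.Set.ofList (expected.map (fun p => PySem.Str.len p))).any
          (fun n => PySem.Set.contains (PySem.Set.ofList expected) (PySem.Str.slice nc none (some n)))) := by
  rw [Bool.eq_iff_iff]
  simp only [List.any_eq_true]
  constructor
  · rintro ⟨p, hp, hsw⟩
    have hpre : p.toList <+: nc.toList := (PySem.Chars.startswith_iff _ _).1
      (by simpa [PySem.Str.startswith_eq] using hsw)
    have hlenp : (0 : Int) ≤ PySem.Str.len p := by simp [PySem.Str.len_eq]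
    refine ⟨PySem.Str.len p, (PySem.Set.mem_ofList _ _).2 (List.mem_map_of_mem hp), ?_⟩
    have hslice : PySem.Str.slice nc none (some (PySem.Str.len p)) = p := by
      apply String.ext
      rw [PySem.Str.toList_slice, PySem.Chars.slice_eq_listSlice,
        PySem.List.slice_to nc.toList hlenp]
      have : (PySem.Str.len p).toNat = p.toList.length := by
        simp [PySem.Str.len_eq]
      rw [this]
      exact (List.prefix_iff_eq_take.1 hpre).symm
    rw [hslice]
    exact (PySem.Set.contains_iff _ _).2 ((PySem.Set.mem_ofList _ _).2 hp)
  · rintro ⟨n, hn, hc⟩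
    have hn' : ∃ p ∈ expected, PySem.Str.len p = n := by
      simpa [PySem.Set.mem_ofList] using hn
    obtain ⟨p, hp, rfl⟩ := hn'
    have hlenp : (0 : Int) ≤ PySem.Str.len p := by simp [PySem.Str.len_eq]
    have hq : PySem.Str.slice nc none (some (PySem.Str.len p)) ∈ expected :=
      (PySem.Set.mem_ofList _ _).1 ((PySem.Set.contains_iff _ _).1 hc)
    refine ⟨_, hq, ?_⟩
    rw [PySem.Str.startswith_eq]
    apply (PySem.Chars.startswith_iff _ _).2
    rw [PySem.Str.toList_slice, PySem.Chars.slice_eq_listSlice,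
      PySem.List.slice_to nc.toList hlenp]
    exact List.take_prefix _ _

-- A's counter loop counts exactly the codes satisfying the per-code test.
theorem pv_foldl_countP (f : String → Bool) (icd : List String) (m : Int) :
    icd.foldl (fun m c => if f c then m + 1 else m) m = m + (icd.countP f : Int) := by
  induction icd generalizing m with
  | nil => simp
  | cons c t ih =>
    simp only [List.foldl_cons, List.countP_cons, ih]
    by_cases h : f c = true
    · simp [h]; ring
    · simp [h]

-- ===== VERDICT (by name: the statement is the Claim_ definition above) =====
theorem evaluate_icd_match_quality_spec : Claim_equal_evaluate_icd_match_quality := by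
  intro icd expected _
  unfold Spec_evaluate_icd_match_quality evaluate_icd_match_quality evaluate_icd_match_quality_alt
  by_cases h : icd = []
  · simp [h]
  · simp only [h, if_false]
    set g : String → Bool := fun code =>
      (PySem.Set.ofList (expected.map (fun p => PySem.Str.len p))).any
        (fun n => PySem.Set.contains (PySem.Set.ofList expected)
          (PySem.Str.slice (PySem.Str.strip (PySem.Str.upper code)) none (some n))) with hg
    have hfold : icd.foldl (fun m code =>
        let normalized_code := PySem.Str.strip (PySem.Str.upper code)
        if expected.any (fun pfx => PySem.Str.startswith normalized_code pfx)
        then m + 1 else m) 0 = ((icd.countP g : Nat) : Int) := by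
      have : (fun (m : Int) code =>
          let normalized_code := PySem.Str.strip (PySem.Str.upper code)
          if expected.any (fun pfx => PySem.Str.startswith normalized_code pfx)
          then m + 1 else m) = fun (m : Int) c => if g c then m + 1 else m := by
        funext m c
        simp only [hg, pv_match_iff]
      rw [this, pv_foldl_countP]
      ring
    rw [hfold]
    have hall : ((icd.map g).all id) = icd.all g := by simp
    have hany : ((icd.map g).any id) = icd.any g := by simp
    rw [hall, hany]
    have hlen : 0 < icd.length := List.length_pos_of_ne_nil h
    have hcle : icd.countP g ≤ icd.length := List.countP_le_length
    by_cases hA : icd.all g = true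
    · have hcp : icd.countP g = icd.length := by
        rw [List.countP_eq_length]
        intro a ha; exact (List.all_eq_true.1 hA) a ha
      have hcond : ((icd.countP g : Nat) : Int) = (icd.length : Int) ∧ ((icd.length : Int)) > 0 :=
        ⟨by rw [hcp], by exact_mod_cast hlen⟩
      rw [if_pos hcond]
      simp [hA]
    · have hlt : icd.countP g < icd.length := by
        rcases Nat.lt_or_ge (icd.countP g) icd.length with h' | h'
        · exact h'
        · exfalso; apply hA
          rw [List.all_eq_true]
          intro a ha
          exact (List.countP_eq_length.1 (Nat.le_antisymm hcle h')) a ha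
      have hne : ¬ (((icd.countP g : Nat) : Int) = ↑icd.length ∧ (↑icd.length : Int) > 0) := by
        intro ⟨h1, _⟩; omega
      simp only [hA, if_false, hne]
      by_cases hAny : icd.any g = true
      · have : 0 < icd.countP g := by
          rw [List.countP_pos_iff]
          simpa using List.any_eq_true.1 hAny
        have : (1 : Int) ≤ ((icd.countP g : Nat) : Int) := by exact_mod_cast this
        simp [hAny, this]
      · have : icd.countP g = 0 := by
          rw [List.countP_eq_zero]
          intro a ha hga
          exact hAny (List.any_eq_true.2 ⟨a, ha, hga⟩)
        simp [hAny, this]
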